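-- pv_equiv track=rewrite | github.com/NeugeMa/CPs-DynamicProgramming | CP5/CP5.py | qtdeMoedasPD
-- ===== SOURCE A (Python) =====
-- def reconstruir_solucao(M, moedas, dp):
--     solucao = []
--     while M > 0:
--         for moeda in moedas:
--             if M - moeda >= 0 and dp[M] == dp[M - moeda] + 1:
--                 solucao.append(moeda)
--                 M -= moeda
--                 break
--     return solucao
--
-- def qtdeMoedasPD(M, moedas):
--     dp = [float('inf')] * (M + 1)
--     dp[0] = 0
--     for i in range(1, M + 1):
--         for moeda in moedas:
--             if i - moeda >= 0:
--                 dp[i] = min(dp[i], dp[i - moeda] + 1)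
--     if dp[M] == float('inf'):
--         return -1, []
--     solucao = reconstruir_solucao(M, moedas, dp)
--     return dp[M], solucao
-- ===== SOURCE B (Python) =====
-- def qtdeMoedasPD(M, moedas):
--     INF = float('inf')
--     dp = [INF] * (M + 1)
--     choice = [0] * (M + 1)
--     dp[0] = 0
--     for i in range(1, M + 1):
--         for moeda in moedas:
--             if moeda <= i and dp[i - moeda] + 1 < dp[i]:
--                 dp[i] = dp[i - moeda] + 1
--                 choice[i] = moeda
--     if dp[M] == INF:
--         return -1, []
--     qtde = dp[M]
--     solucao = []
--     while M > 0:
--         c = choice[M]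
--         solucao.append(c)
--         M -= c
--     return qtde, solucao
-- ===== Notes on version B (the rewrite author's own statement) =====
-- stated objective: simpler
-- what changed: B records, in a parallel choice table, the first coin that strictly improves dp[i] during the build, and reconstructs the solution by walking that table (c = choice[M]; M -= c) instead of A's reconstruir_solucao helper that re-scans all denominations at every step of the walk back; B also updates dp[i] only on strict improvement instead of calling min() for every coin.
import Mathlib
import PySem

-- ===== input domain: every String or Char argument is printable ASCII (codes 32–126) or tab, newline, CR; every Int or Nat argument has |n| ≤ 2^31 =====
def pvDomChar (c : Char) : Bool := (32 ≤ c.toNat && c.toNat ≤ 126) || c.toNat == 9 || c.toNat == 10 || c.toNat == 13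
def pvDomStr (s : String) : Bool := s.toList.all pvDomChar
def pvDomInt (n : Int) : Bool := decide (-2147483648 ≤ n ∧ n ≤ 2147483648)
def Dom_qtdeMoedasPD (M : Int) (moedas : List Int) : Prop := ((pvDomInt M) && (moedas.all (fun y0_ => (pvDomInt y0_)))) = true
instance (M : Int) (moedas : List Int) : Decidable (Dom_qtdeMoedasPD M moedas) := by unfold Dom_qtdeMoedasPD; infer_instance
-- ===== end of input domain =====

-- B replaces A's reconstruir_solucao (which re-scans all coins at every step of the walk back)
-- by a `choice` table recorded during the dp build, so the reconstruction is a plain table walk;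
-- objective: simpler. Return-value equivalence on Pre_ (A raises IndexError outside it).

-- dp cells model Python's `float('inf')`-or-int values: none = inf, some v = the int v.
def pvOSucc : Option Int → Option Int
  | none => none
  | some v => some (v + 1)

-- Python `x < y` on inf-or-int values
def pvOLt : Option Int → Option Int → Bool
  | none, _ => false
  | some _, none => true
  | some a, some b => decide (a < b)

-- Python `x == y` on inf-or-int values
def pvOEq : Option Int → Option Int → Bool
  | none, none => true
  | some a, some b => a == b
  | _, _ => false

-- Python `min(a, b)` (returns the first argument on ties)
def pvOMin (a b : Option Int) : Option Int := if pvOLt b a then b else a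

-- array cell read / write; exact for the nonnegative in-range indices that every access
-- the two programs perform inside Pre_ uses (outside Pre_ the Python A raises IndexError)
def pvaGet {α : Type} (a : Array α) (i : Int) (d : α) : α := a.getD i.toNat d
def pvaSet {α : Type} (a : Array α) (i : Int) (v : α) : Array α := a.setIfInBounds i.toNat v

-- ===== PORT A =====
-- dp = [inf]*(M+1); dp[0] = 0
def pvInit (M : Int) : Array (Option Int) :=
  pvaSet (Array.replicate (M + 1).toNat (none : Option Int)) 0 (some 0)

-- inner `for moeda in moedas: if i - moeda >= 0: dp[i] = min(dp[i], dp[i-moeda]+1)`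
def pvStepA (i : Int) (dp : Array (Option Int)) (moeda : Int) : Array (Option Int) :=
  if 0 ≤ i - moeda then
    pvaSet dp i (pvOMin (pvaGet dp i none) (pvOSucc (pvaGet dp (i - moeda) none)))
  else dp

def pvRowA (moedas : List Int) (dp : Array (Option Int)) (i : Int) : Array (Option Int) :=
  moedas.foldl (pvStepA i) dp

def pvBuildA (M : Int) (moedas : List Int) : Array (Option Int) :=
  (PySem.List.pyRange 1 (M + 1) 1).foldl (pvRowA moedas) (pvInit M)

-- the inner `for moeda in moedas: if …: break` of reconstruir_solucao: first matching coin
def pvFindCoin (M : Int) (dp : Array (Option Int)) : List Int → Option Int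
  | [] => none
  | moeda :: rest =>
    if 0 ≤ M - moeda ∧ pvOEq (pvaGet dp M none) (pvOSucc (pvaGet dp (M - moeda) none)) = true
    then some moeda else pvFindCoin M dp rest

-- `while M > 0: …` of reconstruir_solucao; fuel only makes the loop total (Python diverges
-- when no coin matches, a state unreachable inside Pre_)
def pvReconA (moedas : List Int) (dp : Array (Option Int)) : Nat → Int → List Int → List Int
  | 0, _, solucao => solucao
  | fuel + 1, M, solucao =>
    if 0 < M then
      match pvFindCoin M dp moedas with
      | some moeda => pvReconA moedas dp fuel (M - moeda) (solucao ++ [moeda])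
      | none => pvReconA moedas dp fuel M solucao
    else solucao

def qtdeMoedasPD (M : Int) (moedas : List Int) : Int × List Int :=
  let dp := pvBuildA M moedas
  match pvaGet dp M none with
  | none => (-1, [])
  | some v => (v, pvReconA moedas dp M.toNat M [])

-- ===== PORT B =====
-- inner loop of Source B: on strict improvement record the coin in the choice table
def pvStepB (i : Int) (st : Array (Option Int) × Array Int) (moeda : Int) :
    Array (Option Int) × Array Int :=
  if moeda ≤ i ∧ pvOLt (pvOSucc (pvaGet st.1 (i - moeda) none)) (pvaGet st.1 i none) = true then
    (pvaSet st.1 i (pvOSucc (pvaGet st.1 (i - moeda) none)), pvaSet st.2 i moeda)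
  else st

def pvRowB (moedas : List Int) (st : Array (Option Int) × Array Int) (i : Int) :
    Array (Option Int) × Array Int :=
  moedas.foldl (pvStepB i) st

def pvBuildB (M : Int) (moedas : List Int) : Array (Option Int) × Array Int :=
  (PySem.List.pyRange 1 (M + 1) 1).foldl (pvRowB moedas)
    (pvInit M, Array.replicate (M + 1).toNat (0 : Int))

-- `while M > 0: c = choice[M]; solucao.append(c); M -= c` (fuel only for totality)
def pvReconB (choice : Array Int) : Nat → Int → List Int → List Int
  | 0, _, solucao => solucao
  | fuel + 1, M, solucao =>
    if 0 < M then
      pvReconB choice fuel (M - pvaGet choice M 0) (solucao ++ [pvaGet choice M 0])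
    else solucao

def qtdeMoedasPD_alt (M : Int) (moedas : List Int) : Int × List Int :=
  let st := pvBuildB M moedas
  match pvaGet st.1 M none with
  | none => (-1, [])
  | some v => (v, pvReconB st.2 M.toNat M [])

-- ===== PRECONDITION & SPEC =====
-- Pre_ excludes exactly the inputs where Python A raises IndexError: M < 0 (dp[0] = 0 on an
-- empty table), and M ≥ 1 with a negative coin (dp[i - moeda] read past the end at i = M).
def Pre_qtdeMoedasPD (M : Int) (moedas : List Int) : Prop :=
  0 ≤ M ∧ (M = 0 ∨ ∀ m ∈ moedas, 0 ≤ m)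
instance (M : Int) (moedas : List Int) : Decidable (Pre_qtdeMoedasPD M moedas) := by
  unfold Pre_qtdeMoedasPD; infer_instance

def pvWitness_qtdeMoedasPD : Int × List Int := (11, [1, 5, 2])

def Spec_qtdeMoedasPD (M : Int) (moedas : List Int) (out : Int × List Int) : Prop := out = qtdeMoedasPD_alt M moedas
instance (M : Int) (moedas : List Int) (out : Int × List Int) : Decidable (Spec_qtdeMoedasPD M moedas out) := by unfold Spec_qtdeMoedasPD; infer_instance

-- ===== CLAIM (what is proved, stated in full; the proofs are below) =====
def Claim_equal_qtdeMoedasPD : Prop := ∀ (M : Int) (moedas : List Int), Dom_qtdeMoedasPD M moedas → Pre_qtdeMoedasPD M moedas → Spec_qtdeMoedasPD M moedas (qtdeMoedasPD M moedas)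

-- ===== LEMMAS AND PROOFS =====

-- ===== the LIST MODEL: the two programs re-stated over List, the proof's object =====
def pvGetL (dp : List (Option Int)) (i : Int) : Option Int := PySem.List.pyGetD dp i none

def pvInitL (M : Int) : List (Option Int) :=
  PySem.List.pySetD (List.replicate (M + 1).toNat (none : Option Int)) 0 (some 0)

def pvStepAL (i : Int) (dp : List (Option Int)) (moeda : Int) : List (Option Int) :=
  if 0 ≤ i - moeda then
    PySem.List.pySetD dp i (pvOMin (pvGetL dp i) (pvOSucc (pvGetL dp (i - moeda))))
  else dp

def pvRowAL (moedas : List Int) (dp : List (Option Int)) (i : Int) : List (Option Int) :=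
  moedas.foldl (pvStepAL i) dp

def pvBuildAL (M : Int) (moedas : List Int) : List (Option Int) :=
  (PySem.List.pyRange 1 (M + 1) 1).foldl (pvRowAL moedas) (pvInitL M)

def pvFindCoinL (M : Int) (dp : List (Option Int)) : List Int → Option Int
  | [] => none
  | moeda :: rest =>
    if 0 ≤ M - moeda ∧ pvOEq (pvGetL dp M) (pvOSucc (pvGetL dp (M - moeda))) = true
    then some moeda else pvFindCoinL M dp rest

def pvReconAL (moedas : List Int) (dp : List (Option Int)) : Nat → Int → List Int → List Int
  | 0, _, solucao => solucao
  | fuel + 1, M, solucao =>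
    if 0 < M then
      match pvFindCoinL M dp moedas with
      | some moeda => pvReconAL moedas dp fuel (M - moeda) (solucao ++ [moeda])
      | none => pvReconAL moedas dp fuel M solucao
    else solucao

def qtdeMoedasPDL (M : Int) (moedas : List Int) : Int × List Int :=
  let dp := pvBuildAL M moedas
  match pvGetL dp M with
  | none => (-1, [])
  | some v => (v, pvReconAL moedas dp M.toNat M [])

def pvStepBL (i : Int) (st : List (Option Int) × List Int) (moeda : Int) :
    List (Option Int) × List Int :=
  if moeda ≤ i ∧ pvOLt (pvOSucc (pvGetL st.1 (i - moeda))) (pvGetL st.1 i) = true then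
    (PySem.List.pySetD st.1 i (pvOSucc (pvGetL st.1 (i - moeda))),
     PySem.List.pySetD st.2 i moeda)
  else st

def pvRowBL (moedas : List Int) (st : List (Option Int) × List Int) (i : Int) :
    List (Option Int) × List Int :=
  moedas.foldl (pvStepBL i) st

def pvBuildBL (M : Int) (moedas : List Int) : List (Option Int) × List Int :=
  (PySem.List.pyRange 1 (M + 1) 1).foldl (pvRowBL moedas)
    (pvInitL M, List.replicate (M + 1).toNat (0 : Int))

def pvReconBL (choice : List Int) : Nat → Int → List Int → List Int
  | 0, _, solucao => solucao
  | fuel + 1, M, solucao =>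
    if 0 < M then
      pvReconBL choice fuel (M - PySem.List.pyGetD choice M 0)
        (solucao ++ [PySem.List.pyGetD choice M 0])
    else solucao

def qtdeMoedasPDL_alt (M : Int) (moedas : List Int) : Int × List Int :=
  let st := pvBuildBL M moedas
  match pvGetL st.1 M with
  | none => (-1, [])
  | some v => (v, pvReconBL st.2 M.toNat M [])


-- getD/set toolkit
theorem pvSetOwn {α : Type} (l : List α) (n : Nat) (d : α) : l.set n (l.getD n d) = l := by
  induction l generalizing n with
  | nil => simp
  | cons x xs ih =>
    cases n with
    | zero => simp [List.getD]
    | succ m => simpa [List.getD] using ih m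

theorem pvGetD_nonneg {α : Type} (xs : List α) (i : Int) (d : α) (h : 0 ≤ i) :
    PySem.List.pyGetD xs i d = xs.getD i.toNat d := by
  simp only [PySem.List.pyGetD, PySem.List.pyIdx?, PySem.List.pyGet?, if_pos h]
  by_cases hl : i < (xs.length : Int)
  · simp [hl, List.getD]
  · simp only [hl, Option.bind_none, List.getD, if_false]
    rw [List.getElem?_eq_none (by omega)]

theorem pvSet_nonneg {α : Type} (xs : List α) (i : Int) (v : α) (h : 0 ≤ i) :
    PySem.List.pySetD xs i v = xs.set i.toNat v := PySem.List.pySetD_of_nonneg xs v h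

theorem gsetD_self {α : Type} (l : List α) (n : Nat) (v d : α) (h : n < l.length) :
    (l.set n v).getD n d = v := by
  simp [List.getD, List.getElem?_set_self h]

theorem gsetD_ne {α : Type} (l : List α) {n k : Nat} (v : α) (d : α) (h : n ≠ k) :
    (l.set n v).getD k d = l.getD k d := by
  simp [List.getD, List.getElem?_set_ne h]

-- pvOLt / pvOEq toolkit
theorem pvOLt_succ_self (a : Option Int) : pvOLt (pvOSucc a) a = false := by
  cases a <;> simp [pvOLt, pvOSucc]

theorem pvOLt_isSome {a b : Option Int} (h : pvOLt a b = true) : ∃ w, a = some w := by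
  cases a with
  | none => simp [pvOLt] at h
  | some w => exact ⟨w, rfl⟩

theorem pvOLt_irrefl (a : Option Int) : pvOLt a a = false := by
  cases a <;> simp [pvOLt]

theorem pvOLt_trans {a b c : Option Int} (h1 : pvOLt a b = true) (h2 : pvOLt b c = true) :
    pvOLt a c = true := by
  cases a <;> cases b <;> cases c <;> simp_all [pvOLt] <;> omega

theorem pvOEq_some_succ (w : Int) (y : Option Int) :
    (pvOEq (some w) (pvOSucc y) = true) ↔ (pvOSucc y = some w) := by
  cases y with
  | none => simp [pvOEq, pvOSucc]
  | some u =>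
    simp only [pvOSucc, pvOEq, beq_iff_eq, Option.some.injEq]
    omega

-- B's dp column equals A's dp column (row scan, any state)
theorem pvRow_fst (i : Int) (hi : 0 ≤ i) :
    ∀ (ms : List Int) (dp : List (Option Int)) (ch : List Int),
      (List.foldl (pvStepBL i) (dp, ch) ms).1 = List.foldl (pvStepAL i) dp ms := by
  intro ms
  induction ms with
  | nil => intro dp ch; rfl
  | cons m rest ih =>
    intro dp ch
    have key : pvStepBL i (dp, ch) m = (pvStepAL i dp m, (pvStepBL i (dp, ch) m).2) := by
      refine Prod.ext ?_ rfl
      simp only [pvStepBL, pvStepAL]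
      by_cases h1 : 0 ≤ i - m
      · have h1' : m ≤ i := by omega
        by_cases h2 : pvOLt (pvOSucc (pvGetL dp (i - m))) (pvGetL dp i) = true
        · rw [if_pos (⟨h1', h2⟩ : _ ∧ _), if_pos h1]
          simp only [pvOMin, if_pos h2]
        · rw [if_neg (fun hc : _ ∧ _ => h2 hc.2), if_pos h1]
          simp only [pvOMin, if_neg h2]
          rw [pvGetL, pvGetD_nonneg dp i none hi, pvSet_nonneg dp i _ hi, pvSetOwn]
      · rw [if_neg (fun hc : _ ∧ _ => (by omega : ¬ m ≤ i) hc.1), if_neg h1]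
    simp only [List.foldl_cons]
    rw [key]
    exact ih _ _

theorem pvBuild_fst (M : Int) (moedas : List Int) :
    (pvBuildBL M moedas).1 = pvBuildAL M moedas := by
  unfold pvBuildBL pvBuildAL
  have gen : ∀ (rs : List Int), (∀ r ∈ rs, 0 ≤ r) →
      ∀ (dp : List (Option Int)) (ch : List Int),
        (rs.foldl (pvRowBL moedas) (dp, ch)).1 = rs.foldl (pvRowAL moedas) dp := by
    intro rs
    induction rs with
    | nil => intro _ dp ch; rfl
    | cons r rest ih =>
      intro hr dp ch
      have hr0 : 0 ≤ r := hr r (by simp)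
      have key : pvRowBL moedas (dp, ch) r
          = (pvRowAL moedas dp r, (pvRowBL moedas (dp, ch) r).2) := by
        have := pvRow_fst r hr0 moedas dp ch
        unfold pvRowBL pvRowAL
        exact Prod.ext this rfl
      simp only [List.foldl_cons]
      rw [key]
      exact ih (fun x hx => hr x (by simp [hx])) _ _
  apply gen
  intro r hr
  have := (PySem.List.mem_pyRange_one).1 hr
  omega

-- first coin (in moedas order) m with dp[i-m]+1 = w, read in the PREVIOUS table p
def pvFirstFit (p : List (Option Int)) (i w : Int) : List Int → Option Int
  | [] => none
  | m :: rest =>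
    if 0 ≤ i - m ∧ pvOSucc (pvGetL p (i - m)) = some w then some m else pvFirstFit p i w rest

-- the row scan: result dp[i] value and recorded choice = first coin attaining it
theorem pvScan (p : List (Option Int)) (i : Int) (hi : 1 ≤ i) (hlen : i.toNat < p.length)
    (hpi : p.getD i.toNat none = none) :
    ∀ (ms : List Int), (∀ m ∈ ms, 0 ≤ m) → ∀ (cur : Option Int) (ch : List Int),
      (List.foldl (pvStepBL i) (p.set i.toNat cur, ch) ms = (p.set i.toNat cur, ch)) ∨
      (∃ w c, List.foldl (pvStepBL i) (p.set i.toNat cur, ch) ms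
                = (p.set i.toNat (some w), ch.set i.toNat c) ∧
              pvOLt (some w) cur = true ∧ pvFirstFit p i w ms = some c) := by
  intro ms
  induction ms with
  | nil => intro _ cur ch; left; rfl
  | cons m rest ih =>
    intro hms cur ch
    have hm0 : 0 ≤ m := hms m (by simp)
    have hrest : ∀ x ∈ rest, 0 ≤ x := fun x hx => hms x (by simp [hx])
    have hi0 : (0:Int) ≤ i := by omega
    have hread_i : pvGetL (p.set i.toNat cur) i = cur := by
      rw [pvGetL, pvGetD_nonneg _ _ _ hi0, gsetD_self _ _ _ _ (by simpa using hlen)]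
    simp only [List.foldl_cons]
    by_cases hcase : m ≤ i
    · by_cases hm1 : 1 ≤ m
      · -- genuine coin: reads previous table at i - m < i
        have him0 : 0 ≤ i - m := by omega
        have hne : i.toNat ≠ (i - m).toNat := by omega
        have hread : pvGetL (p.set i.toNat cur) (i - m) = pvGetL p (i - m) := by
          rw [pvGetL, pvGetL, pvGetD_nonneg _ _ _ him0, pvGetD_nonneg _ _ _ him0,
            gsetD_ne _ _ _ hne]
        set X := pvOSucc (pvGetL p (i - m)) with hX
        by_cases himp : pvOLt X cur = true
        · -- strict improvement: record the coin
          have hstep : pvStepBL i (p.set i.toNat cur, ch) m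
              = (p.set i.toNat X, ch.set i.toNat m) := by
            simp only [pvStepBL, hread, hread_i, hX]
            rw [if_pos ⟨hcase, himp⟩, pvSet_nonneg _ _ _ hi0, pvSet_nonneg _ _ _ hi0,
              List.set_set]
          obtain ⟨u, hu⟩ := pvOLt_isSome himp
          rcases ih hrest X (ch.set i.toNat m) with hL | ⟨w, c, heq, hlt, hff⟩
          · right
            refine ⟨u, m, ?_, by rw [← hu]; exact himp, ?_⟩
            · rw [hstep, hL, hu]
            · simp only [pvFirstFit]
              rw [if_pos ⟨him0, by rw [← hX, hu]⟩]
          · right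
            refine ⟨w, c, ?_, pvOLt_trans hlt himp, ?_⟩
            · rw [hstep, heq, List.set_set]
            · simp only [pvFirstFit]
              have : ¬ (0 ≤ i - m ∧ pvOSucc (pvGetL p (i - m)) = some w) := by
                rintro ⟨-, hw⟩
                rw [← hX] at hw
                rw [hw] at hlt
                simp [pvOLt_irrefl] at hlt
              rw [if_neg this]
              exact hff
        · -- no improvement: skip
          have hstep : pvStepBL i (p.set i.toNat cur, ch) m = (p.set i.toNat cur, ch) := by
            simp only [pvStepBL, hread, hread_i, hX]
            rw [if_neg (by rintro ⟨-, h⟩; exact himp h)]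
          rw [hstep]
          rcases ih hrest cur ch with hL | ⟨w, c, heq, hlt, hff⟩
          · left; exact hL
          · right
            refine ⟨w, c, heq, hlt, ?_⟩
            simp only [pvFirstFit]
            have : ¬ (0 ≤ i - m ∧ pvOSucc (pvGetL p (i - m)) = some w) := by
              rintro ⟨-, hw⟩
              rw [← hX] at hw; rw [hw] at himp; exact himp hlt
            rw [if_neg this]
            exact hff
      · -- m = 0: compares dp[i]+1 < dp[i], never fires
        have hm : m = 0 := by omega
        subst hm
        have hstep : pvStepBL i (p.set i.toNat cur, ch) 0 = (p.set i.toNat cur, ch) := by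
          simp only [pvStepBL]
          rw [if_neg]
          rintro ⟨-, h⟩
          rw [show i - 0 = i by ring, hread_i] at h
          rw [pvOLt_succ_self] at h
          exact absurd h (by simp)
        rw [hstep]
        rcases ih hrest cur ch with hL | ⟨w, c, heq, hlt, hff⟩
        · left; exact hL
        · right
          refine ⟨w, c, heq, hlt, ?_⟩
          simp only [pvFirstFit]
          have : ¬ (0 ≤ i - 0 ∧ pvOSucc (pvGetL p (i - 0)) = some w) := by
            rintro ⟨-, hw⟩
            rw [show i - 0 = i by ring, pvGetL, pvGetD_nonneg _ _ _ hi0, hpi] at hw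
            simp [pvOSucc] at hw
          rw [if_neg this]
          exact hff
    · -- coin larger than i: skipped by both
      have hstep : pvStepBL i (p.set i.toNat cur, ch) m = (p.set i.toNat cur, ch) := by
        simp only [pvStepBL]
        rw [if_neg (by rintro ⟨h, -⟩; exact hcase h)]
      rw [hstep]
      rcases ih hrest cur ch with hL | ⟨w, c, heq, hlt, hff⟩
      · left; exact hL
      · right
        refine ⟨w, c, heq, hlt, ?_⟩
        simp only [pvFirstFit]
        rw [if_neg (by rintro ⟨h, -⟩; omega)]
        exact hff

theorem pvFirstFit_found (p : List (Option Int)) (i w : Int) (hi : 1 ≤ i)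
    (hpi : p.getD i.toNat none = none) :
    ∀ (ms : List Int), (∀ m ∈ ms, 0 ≤ m) → ∀ c, pvFirstFit p i w ms = some c →
      0 < c ∧ 0 ≤ i - c ∧ pvGetL p (i - c) = some (w - 1) := by
  intro ms
  induction ms with
  | nil => intro _ c h; simp [pvFirstFit] at h
  | cons m rest ih =>
    intro hms c h
    simp only [pvFirstFit] at h
    by_cases hc : 0 ≤ i - m ∧ pvOSucc (pvGetL p (i - m)) = some w
    · rw [if_pos hc] at h
      obtain rfl : m = c := by simpa using h
      obtain ⟨h1, h2⟩ := hc
      have hm0 : 0 ≤ m := hms m (by simp)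
      have hmpos : 0 < m := by
        rcases lt_or_eq_of_le hm0 with h | h
        · exact h
        · exfalso
          rw [← h] at h2
          rw [show i - 0 = i by ring, pvGetL, pvGetD_nonneg _ _ _ (by omega), hpi] at h2
          simp [pvOSucc] at h2
      refine ⟨hmpos, h1, ?_⟩
      cases hy : pvGetL p (i - m) with
      | none => rw [hy] at h2; simp [pvOSucc] at h2
      | some u =>
        rw [hy] at h2
        simp only [pvOSucc, Option.some.injEq] at h2
        simp [← h2]
    · rw [if_neg hc] at h
      exact ih (fun x hx => hms x (by simp [hx])) c h

theorem pvFindCoin_eq (d p : List (Option Int)) (j w : Int) (hj : 1 ≤ j)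
    (hdj : pvGetL d j = some w) (hpj : pvGetL p j = none)
    (hagree : ∀ x : Int, 0 ≤ x → x < j → pvGetL d x = pvGetL p x) :
    ∀ (ms : List Int), (∀ m ∈ ms, 0 ≤ m) → pvFindCoinL j d ms = pvFirstFit p j w ms := by
  intro ms
  induction ms with
  | nil => intro _; rfl
  | cons m rest ih =>
    intro hms
    have hrest := ih (fun x hx => hms x (by simp [hx]))
    have hm0 : 0 ≤ m := hms m (by simp)
    simp only [pvFindCoinL, pvFirstFit, hdj]
    by_cases h1 : 0 ≤ j - m
    · by_cases hm1 : 1 ≤ m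
      · have heq : pvGetL d (j - m) = pvGetL p (j - m) := hagree _ h1 (by omega)
        rw [heq]
        by_cases h2 : pvOSucc (pvGetL p (j - m)) = some w
        · rw [if_pos ⟨h1, (pvOEq_some_succ w _).2 h2⟩, if_pos ⟨h1, h2⟩]
        · rw [if_neg (by rintro ⟨-, hx⟩; exact h2 ((pvOEq_some_succ w _).1 hx)),
            if_neg (by rintro ⟨-, hx⟩; exact h2 hx)]
          exact hrest
      · have hm : m = 0 := by omega
        subst hm
        rw [show j - 0 = j by ring, hdj]
        rw [if_neg (by
            rintro ⟨-, hx⟩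
            have hww : w = w + 1 := by simpa [pvOEq, pvOSucc] using hx
            omega),
          if_neg (by rintro ⟨-, hx⟩; rw [hpj] at hx; simp [pvOSucc] at hx)]
        exact hrest
    · rw [if_neg (by rintro ⟨hx, -⟩; exact h1 hx), if_neg (by rintro ⟨hx, -⟩; exact h1 hx)]
      exact hrest

-- the B build, row by row
def pvStB (M : Int) (moedas : List Int) : Nat → List (Option Int) × List Int
  | 0 => (pvInitL M, List.replicate (M + 1).toNat (0 : Int))
  | t + 1 => pvRowBL moedas (pvStB M moedas t) ((t : Int) + 1)

theorem pvBuildB_eq (M : Int) (moedas : List Int) (hM : 0 ≤ M) :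
    pvBuildBL M moedas = pvStB M moedas M.toNat := by
  have gen : ∀ t : Nat,
      (PySem.List.pyRange 1 ((t : Int) + 1) 1).foldl (pvRowBL moedas)
        (pvInitL M, List.replicate (M + 1).toNat (0 : Int)) = pvStB M moedas t := by
    intro t
    induction t with
    | zero => rw [PySem.List.pyRange_one_eq_nil (by norm_num)]; rfl
    | succ s ihs =>
      have hcast : ((s + 1 : Nat) : Int) + 1 = ((s : Int) + 1) + 1 := by push_cast; ring
      rw [hcast, PySem.List.pyRange_one_succ_right (by omega), List.foldl_append, ihs]
      rfl
  unfold pvBuildBL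
  rw [show PySem.List.pyRange 1 (M + 1) 1 = PySem.List.pyRange 1 ((M.toNat : Int) + 1) 1
    from by rw [show M + 1 = (M.toNat : Int) + 1 from by omega]]
  exact gen M.toNat

-- a row touches only its own index
theorem pvRowB_getD_ne (moedas : List Int) (i : Int) (hi : 0 ≤ i) (k : Nat)
    (hk : k ≠ i.toNat) :
    ∀ (st : List (Option Int) × List Int),
      (pvRowBL moedas st i).1.getD k none = st.1.getD k none ∧
      (pvRowBL moedas st i).2.getD k 0 = st.2.getD k 0 := by
  unfold pvRowBL
  induction moedas with
  | nil => intro st; exact ⟨rfl, rfl⟩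
  | cons m rest ih =>
    intro st
    simp only [List.foldl_cons]
    have hstep : (pvStepBL i st m).1.getD k none = st.1.getD k none ∧
        (pvStepBL i st m).2.getD k 0 = st.2.getD k 0 := by
      simp only [pvStepBL]
      split
      · constructor
        · show (PySem.List.pySetD st.1 i (pvOSucc (pvGetL st.1 (i - m)))).getD k none
              = st.1.getD k none
          rw [pvSet_nonneg _ _ _ hi, gsetD_ne _ _ _ (Ne.symm hk)]
        · show (PySem.List.pySetD st.2 i m).getD k 0 = st.2.getD k 0
          rw [pvSet_nonneg _ _ _ hi, gsetD_ne _ _ _ (Ne.symm hk)]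
      · exact ⟨rfl, rfl⟩
    obtain ⟨h1, h2⟩ := ih (pvStepBL i st m)
    exact ⟨h1.trans hstep.1, h2.trans hstep.2⟩

theorem pvRowB_len (moedas : List Int) (i : Int) (hi : 0 ≤ i) :
    ∀ (st : List (Option Int) × List Int),
      (pvRowBL moedas st i).1.length = st.1.length ∧
      (pvRowBL moedas st i).2.length = st.2.length := by
  unfold pvRowBL
  induction moedas with
  | nil => intro st; exact ⟨rfl, rfl⟩
  | cons m rest ih =>
    intro st
    simp only [List.foldl_cons]
    have hstep : (pvStepBL i st m).1.length = st.1.length ∧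
        (pvStepBL i st m).2.length = st.2.length := by
      simp only [pvStepBL]
      split
      · constructor
        · show (PySem.List.pySetD st.1 i (pvOSucc (pvGetL st.1 (i - m)))).length = st.1.length
          rw [pvSet_nonneg _ _ _ hi]; simp
        · show (PySem.List.pySetD st.2 i m).length = st.2.length
          rw [pvSet_nonneg _ _ _ hi]; simp
      · exact ⟨rfl, rfl⟩
    obtain ⟨h1, h2⟩ := ih (pvStepBL i st m)
    exact ⟨h1.trans hstep.1, h2.trans hstep.2⟩

theorem pvStB_len (M : Int) (moedas : List Int) :
    ∀ t : Nat, (pvStB M moedas t).1.length = (M + 1).toNat ∧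
      (pvStB M moedas t).2.length = (M + 1).toNat := by
  intro t
  induction t with
  | zero =>
    constructor
    · show (pvInitL M).length = _
      unfold pvInitL
      rw [pvSet_nonneg _ _ _ (by norm_num)]
      simp only [List.length_set, List.length_replicate]
    · simp [pvStB]
  | succ s ihs =>
    have h := pvRowB_len moedas ((s : Int) + 1) (by omega) (pvStB M moedas s)
    exact ⟨h.1.trans ihs.1, h.2.trans ihs.2⟩

theorem pvInit_getD (M : Int) (hM : 0 ≤ M) (k : Nat) :
    (pvInitL M).getD k none = if k = 0 then some 0 else none := by
  unfold pvInitL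
  rw [pvSet_nonneg _ _ _ (by norm_num)]
  simp only [Int.toNat_zero]
  by_cases hk : k = 0
  · subst hk
    rw [if_pos rfl, gsetD_self _ _ _ _ (by simp only [List.length_replicate]; omega)]
  · rw [if_neg hk, gsetD_ne _ _ _ (by omega)]
    simp only [List.getD, List.getElem?_replicate]
    split <;> rfl

theorem pvStB_untouched (M : Int) (moedas : List Int) (hM : 0 ≤ M) :
    ∀ (t k : Nat), t < k → (pvStB M moedas t).1.getD k none = none := by
  intro t
  induction t with
  | zero =>
    intro k hk
    show (pvInitL M).getD k none = none
    rw [pvInit_getD M hM k, if_neg (by omega)]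
  | succ s ihs =>
    intro k hk
    have h := pvRowB_getD_ne moedas ((s : Int) + 1) (by omega) k (by omega)
      (pvStB M moedas s)
    show (pvRowBL moedas (pvStB M moedas s) ((s : Int) + 1)).1.getD k none = none
    rw [h.1]
    exact ihs k (by omega)

theorem pvStB_stable (M : Int) (moedas : List Int) (hM : 0 ≤ M) :
    ∀ (s t k : Nat), k ≤ t →
      (pvStB M moedas (t + s)).1.getD k none = (pvStB M moedas t).1.getD k none ∧
      (pvStB M moedas (t + s)).2.getD k 0 = (pvStB M moedas t).2.getD k 0 := by
  intro s
  induction s with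
  | zero => intro t k _; exact ⟨rfl, rfl⟩
  | succ r ihr =>
    intro t k hk
    have harr : t + (r + 1) = (t + r) + 1 := by omega
    rw [harr]
    have h := pvRowB_getD_ne moedas (((t + r : Nat) : Int) + 1) (by positivity) k
      (by omega) (pvStB M moedas (t + r))
    refine ⟨?_, ?_⟩
    · show (pvRowBL moedas (pvStB M moedas (t + r)) _).1.getD k none = _
      rw [h.1]; exact (ihr t k hk).1
    · show (pvRowBL moedas (pvStB M moedas (t + r)) _).2.getD k 0 = _
      rw [h.2]; exact (ihr t k hk).2

-- the central fact: at every reachable state j the coin A's reconstrução re-derives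
-- is exactly the one B recorded in the choice table
theorem pvFact (M : Int) (moedas : List Int) (hM : 0 ≤ M) (hms : ∀ m ∈ moedas, 0 ≤ m)
    (j w : Int) (hj1 : 1 ≤ j) (hjM : j ≤ M)
    (hw : pvGetL (pvStB M moedas M.toNat).1 j = some w) :
    pvFindCoinL j (pvStB M moedas M.toNat).1 moedas
        = some ((pvStB M moedas M.toNat).2.getD j.toNat 0) ∧
      0 < (pvStB M moedas M.toNat).2.getD j.toNat 0 ∧
      0 ≤ j - (pvStB M moedas M.toNat).2.getD j.toNat 0 ∧
      pvGetL (pvStB M moedas M.toNat).1 (j - (pvStB M moedas M.toNat).2.getD j.toNat 0)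
        = some (w - 1) := by
  set t := j.toNat - 1 with ht
  have hjt : j.toNat = t + 1 := by omega
  have hjcast : ((t : Int) + 1) = j := by omega
  have htM : t + 1 ≤ M.toNat := by omega
  set p := (pvStB M moedas t).1 with hp
  set cht := (pvStB M moedas t).2 with hcht
  have hplen : p.length = (M + 1).toNat := (pvStB_len M moedas t).1
  have hchlen : cht.length = (M + 1).toNat := (pvStB_len M moedas t).2
  have hjlen : j.toNat < p.length := by rw [hplen]; omega
  have hpnone : p.getD j.toNat none = none := by
    rw [hjt]; exact pvStB_untouched M moedas hM t (t + 1) (by omega)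
  have hpp : p = p.set j.toNat none := by
    conv_lhs => rw [← pvSetOwn p j.toNat none]
    rw [hpnone]
  have hfold : List.foldl (pvStepBL j) (p, cht) moedas = pvStB M moedas (t + 1) := by
    show _ = pvRowBL moedas (pvStB M moedas t) ((t : Int) + 1)
    rw [hjcast]
    rfl
  have hsc := pvScan p j hj1 hjlen hpnone moedas hms none cht
  rw [← hpp] at hsc
  have hstab := pvStB_stable M moedas hM (M.toNat - (t + 1)) (t + 1) j.toNat (by omega)
  rw [show (t + 1) + (M.toNat - (t + 1)) = M.toNat by omega] at hstab
  rcases hsc with hL | ⟨w0, c0, heq, _, hff⟩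
  · exfalso
    have h1 : (pvStB M moedas (t + 1)).1.getD j.toNat none = none := by
      rw [← hfold, hL]; exact hpnone
    rw [pvGetL, pvGetD_nonneg _ _ _ (by omega), hstab.1, h1] at hw
    exact absurd hw (by simp)
  · have h1 : (pvStB M moedas (t + 1)).1 = p.set j.toNat (some w0) := by rw [← hfold, heq]
    have h2 : (pvStB M moedas (t + 1)).2 = cht.set j.toNat c0 := by rw [← hfold, heq]
    have hdFj : (pvStB M moedas M.toNat).1.getD j.toNat none = some w0 := by
      rw [hstab.1, h1, gsetD_self _ _ _ _ hjlen]
    have hww : w0 = w := by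
      rw [pvGetL, pvGetD_nonneg _ _ _ (by omega), hdFj] at hw
      simpa using hw
    subst hww
    have hcF : (pvStB M moedas M.toNat).2.getD j.toNat 0 = c0 := by
      rw [hstab.2, h2, gsetD_self _ _ _ _ (by rw [hchlen]; omega)]
    have hagree : ∀ x : Int, 0 ≤ x → x < j →
        pvGetL (pvStB M moedas M.toNat).1 x = pvGetL p x := by
      intro x hx0 hxj
      have hxt : x.toNat ≤ t := by omega
      have hs := (pvStB_stable M moedas hM (M.toNat - t) t x.toNat hxt).1
      rw [show t + (M.toNat - t) = M.toNat by omega] at hs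
      rw [pvGetL, pvGetL, pvGetD_nonneg _ _ _ hx0, pvGetD_nonneg _ _ _ hx0, hs]
    obtain ⟨hc0, hjc0, hpval⟩ := pvFirstFit_found p j w0 hj1 hpnone moedas hms c0 hff
    have hpj : pvGetL p j = none := by
      rw [pvGetL, pvGetD_nonneg _ _ _ (by omega)]; exact hpnone
    have hfc := pvFindCoin_eq (pvStB M moedas M.toNat).1 p j w0 hj1 hw hpj hagree moedas hms
    refine ⟨?_, ?_, ?_, ?_⟩
    · rw [hfc, hcF, hff]
    · rw [hcF]; exact hc0
    · rw [hcF]; exact hjc0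
    · rw [hcF, hagree _ hjc0 (by omega), hpval]

-- the two reconstructions walk the same states and emit the same coins
theorem pvRecon_eq (M : Int) (moedas : List Int) (hM : 0 ≤ M)
    (hms : ∀ m ∈ moedas, 0 ≤ m) :
    ∀ (fuel : Nat) (j : Int), 0 ≤ j → j ≤ M →
      (∃ w, pvGetL (pvStB M moedas M.toNat).1 j = some w) → ∀ acc,
      pvReconAL moedas (pvStB M moedas M.toNat).1 fuel j acc
        = pvReconBL (pvStB M moedas M.toNat).2 fuel j acc := by
  intro fuel
  induction fuel with
  | zero => intro j _ _ _ acc; rfl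
  | succ f ihf =>
    intro j hj0 hjM hfin acc
    obtain ⟨w, hw⟩ := hfin
    by_cases hpos : 0 < j
    · obtain ⟨hfc, hc0, hjc, hval⟩ := pvFact M moedas hM hms j w (by omega) hjM hw
      have hchd : PySem.List.pyGetD (pvStB M moedas M.toNat).2 j 0
          = (pvStB M moedas M.toNat).2.getD j.toNat 0 := pvGetD_nonneg _ _ _ (by omega)
      simp only [pvReconAL, pvReconBL, if_pos hpos, hfc, hchd]
      exact ihf _ hjc (by omega) ⟨w - 1, hval⟩ _
    · simp only [pvReconAL, pvReconBL, if_neg hpos]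

-- the two list models agree on Pre_
theorem pvModel_eq (M : Int) (moedas : List Int) (hM : 0 ≤ M)
    (hcase : M = 0 ∨ ∀ m ∈ moedas, 0 ≤ m) :
    qtdeMoedasPDL M moedas = qtdeMoedasPDL_alt M moedas := by
  by_cases hms : ∀ m ∈ moedas, 0 ≤ m
  · have hB := pvBuildB_eq M moedas hM
    have hfst := pvBuild_fst M moedas
    unfold qtdeMoedasPDL qtdeMoedasPDL_alt
    rw [← hfst, hB]
    cases hv : pvGetL (pvStB M moedas M.toNat).1 M with
    | none => simp only [hv]
    | some v =>
      simp only [hv]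
      rw [pvRecon_eq M moedas hM hms M.toNat M hM (le_refl M) ⟨v, hv⟩ []]
  · have hM0 : M = 0 := by
      rcases hcase with h | h
      · exact h
      · exact absurd h hms
    subst hM0
    have hr : PySem.List.pyRange 1 (0 + 1) 1 = [] :=
      PySem.List.pyRange_one_eq_nil (by norm_num)
    unfold qtdeMoedasPDL qtdeMoedasPDL_alt pvBuildAL pvBuildBL
    rw [hr]
    simp only [List.foldl_nil]
    have h0 : pvGetL (pvInitL 0) 0 = some 0 := by
      rw [pvGetL, pvGetD_nonneg _ _ _ (le_refl 0)]
      simpa using pvInit_getD 0 (le_refl 0) 0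
    rw [h0]
    rfl

-- ===== simulation: the Array ports compute exactly the list models =====
theorem pvaGet_toList {α : Type} (a : Array α) (n : Nat) (d : α) :
    a.getD n d = a.toList.getD n d := by
  simp only [Array.getD, List.getD]
  split
  · next h => simp [List.getElem?_eq_getElem (by simpa using h)]
  · next h =>
    rw [List.getElem?_eq_none (by simpa using h)]
    rfl

theorem pvaGet_sim {α : Type} (a : Array α) (i : Int) (d : α) (h : 0 ≤ i) :
    pvaGet a i d = PySem.List.pyGetD a.toList i d := by
  rw [pvaGet, pvGetD_nonneg _ _ _ h, pvaGet_toList]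

theorem pvaSet_sim {α : Type} (a : Array α) (i : Int) (v : α) (h : 0 ≤ i) :
    (pvaSet a i v).toList = PySem.List.pySetD a.toList i v := by
  rw [pvaSet, pvSet_nonneg _ _ _ h, Array.toList_setIfInBounds]

theorem pvInit_sim (M : Int) : (pvInit M).toList = pvInitL M := by
  rw [pvInit, pvaSet_sim _ _ _ (le_refl 0), Array.toList_replicate]
  rfl

theorem pvStepA_sim (i : Int) (hi : 0 ≤ i) (dp : Array (Option Int)) (m : Int) :
    (pvStepA i dp m).toList = pvStepAL i dp.toList m := by
  unfold pvStepA pvStepAL pvGetL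
  by_cases h : 0 ≤ i - m
  · rw [if_pos h, if_pos h, pvaSet_sim _ _ _ hi, pvaGet_sim _ _ _ hi, pvaGet_sim _ _ _ h]
  · rw [if_neg h, if_neg h]

theorem pvRowA_sim (moedas : List Int) (i : Int) (hi : 0 ≤ i) :
    ∀ (dp : Array (Option Int)), (pvRowA moedas dp i).toList = pvRowAL moedas dp.toList i := by
  unfold pvRowA pvRowAL
  induction moedas with
  | nil => intro dp; rfl
  | cons m rest ih =>
    intro dp
    simp only [List.foldl_cons]
    rw [← pvStepA_sim i hi dp m]
    exact ih _

theorem pvBuildA_sim (M : Int) (moedas : List Int) :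
    (pvBuildA M moedas).toList = pvBuildAL M moedas := by
  unfold pvBuildA pvBuildAL
  have gen : ∀ (rs : List Int), (∀ r ∈ rs, 0 ≤ r) → ∀ (dp : Array (Option Int)),
      (rs.foldl (pvRowA moedas) dp).toList = rs.foldl (pvRowAL moedas) dp.toList := by
    intro rs
    induction rs with
    | nil => intro _ dp; rfl
    | cons r rest ih =>
      intro hr dp
      simp only [List.foldl_cons]
      rw [← pvRowA_sim moedas r (hr r (by simp)) dp]
      exact ih (fun x hx => hr x (by simp [hx])) _
  rw [← pvInit_sim M]
  apply gen
  intro r hr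
  have := (PySem.List.mem_pyRange_one).1 hr
  omega

theorem pvFindCoin_sim (j : Int) (hj : 0 ≤ j) (dp : Array (Option Int)) :
    ∀ (ms : List Int), pvFindCoin j dp ms = pvFindCoinL j dp.toList ms := by
  intro ms
  induction ms with
  | nil => rfl
  | cons m rest ih =>
    simp only [pvFindCoin, pvFindCoinL, pvGetL]
    by_cases h : 0 ≤ j - m
    · rw [pvaGet_sim _ _ _ hj, pvaGet_sim _ _ _ h, ih]
      rfl
    · rw [if_neg (fun hc : _ ∧ _ => h hc.1), if_neg (fun hc : _ ∧ _ => h hc.1), ih]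

theorem pvReconA_sim (moedas : List Int) (dp : Array (Option Int)) :
    ∀ (fuel : Nat) (j : Int) (acc : List Int),
      pvReconA moedas dp fuel j acc = pvReconAL moedas dp.toList fuel j acc := by
  intro fuel
  induction fuel with
  | zero => intro j acc; rfl
  | succ f ihf =>
    intro j acc
    simp only [pvReconA, pvReconAL]
    by_cases hpos : 0 < j
    · rw [if_pos hpos, if_pos hpos, pvFindCoin_sim j (le_of_lt hpos) dp moedas]
      cases pvFindCoinL j dp.toList moedas with
      | none => exact ihf j acc
      | some c => exact ihf (j - c) (acc ++ [c])
    · rw [if_neg hpos, if_neg hpos]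

theorem pvStepB_sim (i : Int) (hi : 0 ≤ i) (dp : Array (Option Int)) (ch : Array Int)
    (m : Int) :
    ((pvStepB i (dp, ch) m).1.toList, (pvStepB i (dp, ch) m).2.toList)
      = pvStepBL i (dp.toList, ch.toList) m := by
  unfold pvStepB pvStepBL pvGetL
  by_cases hm : m ≤ i
  · have him : 0 ≤ i - m := by omega
    rw [show (dp, ch).1 = dp from rfl, show (dp, ch).2 = ch from rfl,
      show (dp.toList, ch.toList).1 = dp.toList from rfl,
      show (dp.toList, ch.toList).2 = ch.toList from rfl,
      pvaGet_sim _ _ _ hi, pvaGet_sim _ _ _ him]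
    by_cases h2 : pvOLt (pvOSucc (PySem.List.pyGetD dp.toList (i - m) none))
        (PySem.List.pyGetD dp.toList i none) = true
    · rw [if_pos ⟨hm, h2⟩, if_pos ⟨hm, h2⟩,
        pvaSet_sim _ _ _ hi, pvaSet_sim _ _ _ hi]
    · rw [if_neg (fun hc : _ ∧ _ => h2 hc.2), if_neg (fun hc : _ ∧ _ => h2 hc.2)]
  · rw [if_neg (fun hc : _ ∧ _ => hm hc.1), if_neg (fun hc : _ ∧ _ => hm hc.1)]

theorem pvRowB_sim (moedas : List Int) (i : Int) (hi : 0 ≤ i) :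
    ∀ (dp : Array (Option Int)) (ch : Array Int),
      ((pvRowB moedas (dp, ch) i).1.toList, (pvRowB moedas (dp, ch) i).2.toList)
        = pvRowBL moedas (dp.toList, ch.toList) i := by
  unfold pvRowB pvRowBL
  induction moedas with
  | nil => intro dp ch; rfl
  | cons m rest ih =>
    intro dp ch
    simp only [List.foldl_cons]
    rw [← pvStepB_sim i hi dp ch m]
    exact ih _ _

theorem pvBuildB_sim (M : Int) (moedas : List Int) :
    ((pvBuildB M moedas).1.toList, (pvBuildB M moedas).2.toList) = pvBuildBL M moedas := by
  unfold pvBuildB pvBuildBL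
  have gen : ∀ (rs : List Int), (∀ r ∈ rs, 0 ≤ r) →
      ∀ (dp : Array (Option Int)) (ch : Array Int),
        ((rs.foldl (pvRowB moedas) (dp, ch)).1.toList,
          (rs.foldl (pvRowB moedas) (dp, ch)).2.toList)
          = rs.foldl (pvRowBL moedas) (dp.toList, ch.toList) := by
    intro rs
    induction rs with
    | nil => intro _ dp ch; rfl
    | cons r rest ih =>
      intro hr dp ch
      simp only [List.foldl_cons]
      rw [← pvRowB_sim moedas r (hr r (by simp)) dp ch]
      exact ih (fun x hx => hr x (by simp [hx])) _ _
  rw [show pvInitL M = (pvInit M).toList from (pvInit_sim M).symm,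
    show List.replicate (M + 1).toNat (0 : Int)
        = (Array.replicate (M + 1).toNat (0 : Int)).toList from Array.toList_replicate.symm]
  apply gen
  intro r hr
  have := (PySem.List.mem_pyRange_one).1 hr
  omega

theorem pvReconB_sim (ch : Array Int) :
    ∀ (fuel : Nat) (j : Int) (acc : List Int),
      pvReconB ch fuel j acc = pvReconBL ch.toList fuel j acc := by
  intro fuel
  induction fuel with
  | zero => intro j acc; rfl
  | succ f ihf =>
    intro j acc
    simp only [pvReconB, pvReconBL]
    by_cases hpos : 0 < j
    · rw [if_pos hpos, if_pos hpos, pvaGet_sim _ _ _ (le_of_lt hpos)]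
      exact ihf _ _
    · rw [if_neg hpos, if_neg hpos]

theorem pvPortA_sim (M : Int) (moedas : List Int) (hM : 0 ≤ M) :
    qtdeMoedasPD M moedas = qtdeMoedasPDL M moedas := by
  have hb := pvBuildA_sim M moedas
  have hread : pvaGet (pvBuildA M moedas) M none = pvGetL (pvBuildAL M moedas) M := by
    rw [pvaGet_sim _ _ _ hM, hb, pvGetL]
  unfold qtdeMoedasPD qtdeMoedasPDL
  cases hv : pvGetL (pvBuildAL M moedas) M with
  | none => simp only [hread, hv]
  | some v =>
    simp only [hread, hv]
    rw [pvReconA_sim moedas (pvBuildA M moedas) M.toNat M [], hb]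

theorem pvPortB_sim (M : Int) (moedas : List Int) (hM : 0 ≤ M) :
    qtdeMoedasPD_alt M moedas = qtdeMoedasPDL_alt M moedas := by
  have hb := pvBuildB_sim M moedas
  have hb1 : (pvBuildB M moedas).1.toList = (pvBuildBL M moedas).1 := by rw [← hb]
  have hb2 : (pvBuildB M moedas).2.toList = (pvBuildBL M moedas).2 := by rw [← hb]
  have hread : pvaGet (pvBuildB M moedas).1 M none = pvGetL (pvBuildBL M moedas).1 M := by
    rw [pvaGet_sim _ _ _ hM, hb1, pvGetL]
  unfold qtdeMoedasPD_alt qtdeMoedasPDL_alt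
  cases hv : pvGetL (pvBuildBL M moedas).1 M with
  | none => simp only [hread, hv]
  | some v =>
    simp only [hread, hv]
    rw [pvReconB_sim (pvBuildB M moedas).2 M.toNat M [], hb2]

-- ===== VERDICT (by name: the statement is the Claim_ definition above) =====
theorem qtdeMoedasPD_spec : Claim_equal_qtdeMoedasPD := by
  intro M moedas _ hPre
  obtain ⟨hM, hcase⟩ := hPre
  unfold Spec_qtdeMoedasPD
  rw [pvPortA_sim M moedas hM, pvPortB_sim M moedas hM, pvModel_eq M moedas hM hcase]
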